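-- pv_equiv track=rewrite | github.com/joric/oneliners | leetcode/restore-the-array.py | numberOfArrays
-- ===== SOURCE A (Python) =====
-- def numberOfArrays(s: str, k: int) -> int:
--     n = len(s)
--     dp = [0]*n
--     for i in range(n):
--         for j in range(len(str(k))):
--             if i-j<0:
--                 break
--             t = s[i-j:i+1]
--             if t[0]=='0': continue
--             if 1 <= int(t) <= k:
--                 dp[i]+=dp[i-j-1] if i-j-1>=0 else 1
--     return dp[n-1] % (10**9+7)
-- ===== SOURCE B (Python) =====
-- def numberOfArrays(s, k):
--     MOD = 10 ** 9 + 7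
--     if k < 1:
--         return 0
--     d = len(str(k))
--     n = len(s)
--     f = [0] * (n + 1)
--     f[n] = 1
--     # window = f[i+1] + ... + f[min(i+d-1, n)], maintained as i decreases:
--     # a part shorter than len(str(k)) digits is always <= k once the
--     # leading-zero test passes, so those splits form a running sum; only
--     # the single part of full length d needs its value parsed and compared.
--     window = f[n] if d > 1 else 0
--     for i in range(n - 1, -1, -1):
--         if s[i] != '0':
--             ways = window
--             if i + d <= n and int(s[i:i + d]) <= k:
--                 ways += f[i + d]
--             f[i] = ways
--         window += f[i]
--         j = i + d - 1
--         if j <= n: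
--             window -= f[j]
--     return f[0] % MOD
-- ===== Notes on version B (the rewrite author's own statement) =====
-- stated objective: alternative
-- what changed: A fills dp forward with an inner loop over every part length, slicing and int()-parsing each of the up-to-d windows ending at i; B removes that inner loop entirely: it fills suffix counts backwards keeping a sliding-window running sum of the last d-1 counts (a part shorter than len(str(k)) is always <= k once the leading-zero test passes) and parses just the single full-length-d window per position.
import Mathlib
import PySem

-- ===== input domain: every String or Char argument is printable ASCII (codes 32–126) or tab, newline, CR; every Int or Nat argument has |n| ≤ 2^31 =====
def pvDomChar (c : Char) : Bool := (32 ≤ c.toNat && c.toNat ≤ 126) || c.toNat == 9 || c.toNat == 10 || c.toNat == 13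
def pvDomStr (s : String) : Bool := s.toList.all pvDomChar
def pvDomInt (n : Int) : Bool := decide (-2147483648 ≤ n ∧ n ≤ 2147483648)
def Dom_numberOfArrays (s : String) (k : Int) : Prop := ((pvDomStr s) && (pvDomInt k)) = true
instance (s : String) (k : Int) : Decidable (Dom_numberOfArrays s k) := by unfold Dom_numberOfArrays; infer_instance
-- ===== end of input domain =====

-- B replaces A's inner loop over all part-lengths by a sliding-window running sum
-- over suffix counts plus one full-length window parse-and-compare per position ("alternative").
-- A raises on the empty string and on strings with a non-digit character; Pre_ excludes exactly those.

-- ===== PORT A =====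
-- inner 'for j in range(len(str(k)))' loop of A, with its 'break' and 'continue'
def pvAInner (l : List Char) (k : Int) (i : Int) (dp : List Int) : List Int → List Int
  | [] => dp
  | j :: rest =>
    if i - j < 0 then dp        -- break
    else
      let t := PySem.List.slice l (some (i - j)) (some (i + 1))
      if (PySem.List.pyGet? t 0).getD ' ' = '0' then pvAInner l k i dp rest   -- continue
      else
        let v := (PySem.Int.ofChars? t).getD 0
        if 1 ≤ v ∧ v ≤ k then
          pvAInner l k i
            (PySem.List.pySetD dp i (PySem.List.pyGetD dp i 0 +
              (if 0 ≤ i - j - 1 then PySem.List.pyGetD dp (i - j - 1) 0 else 1))) rest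
        else pvAInner l k i dp rest

def numberOfArrays (s : String) (k : Int) : Int :=
  let l := s.toList
  let n : Int := PySem.List.len l
  let dp :=
    (PySem.List.pyRange 0 n 1).foldl
      (fun dp i => pvAInner l k i dp (PySem.List.pyRange 0 ((PySem.Int.toChars k).length : Int) 1))
      (List.replicate n.toNat 0)
  PySem.Int.mod ((PySem.List.pyGet? dp (n - 1)).getD 0) (10 ^ 9 + 7)

-- ===== PORT B =====
-- loop body of B: update the suffix-count table f and the running window sum
def pvBStepFun (l : List Char) (k d n : Int) (st : List Int × Int) (i : Int) : List Int × Int :=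
  let f := st.1
  let window := st.2
  let f :=
    if ¬ ((PySem.List.pyGet? l i).getD ' ' = '0') then
      let ways := window
      let ways := if i + d ≤ n ∧
          (PySem.Int.ofChars? (PySem.List.slice l (some i) (some (i + d)))).getD 0 ≤ k then
          ways + PySem.List.pyGetD f (i + d) 0 else ways
      PySem.List.pySetD f i ways
    else f
  let window := window + PySem.List.pyGetD f i 0
  let j := i + d - 1
  let window := if j ≤ n then window - PySem.List.pyGetD f j 0 else window
  (f, window)

def numberOfArrays_alt (s : String) (k : Int) : Int :=
  if k < 1 then 0
  else
    let d : Int := ((PySem.Int.toChars k).length : Int)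
    let l := s.toList
    let n : Int := PySem.List.len l
    let f0 := PySem.List.pySetD (List.replicate (n.toNat + 1) 0) n 1
    let w0 : Int := if 1 < d then PySem.List.pyGetD f0 n 0 else 0
    let st := (PySem.List.pyRange (n - 1) (-1) (-1)).foldl (pvBStepFun l k d n) (f0, w0)
    PySem.Int.mod ((PySem.List.pyGet? st.1 0).getD 0) (10 ^ 9 + 7)

-- ===== PRECONDITION & SPEC =====
-- Pre_ = exactly the inputs where Python A returns: a nonempty all-digit string
-- (on "" A raises IndexError, on any other string with a non-digit A raises ValueError).
def Pre_numberOfArrays (s : String) (k : Int) : Prop := PySem.Str.strIsdigit s = true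
instance (s : String) (k : Int) : Decidable (Pre_numberOfArrays s k) := by unfold Pre_numberOfArrays; infer_instance
def pvWitness_numberOfArrays : String × Int := ("2312", 1000)

def Spec_numberOfArrays (s : String) (k : Int) (out : Int) : Prop := out = numberOfArrays_alt s k
instance (s : String) (k : Int) (out : Int) : Decidable (Spec_numberOfArrays s k out) := by unfold Spec_numberOfArrays; infer_instance

-- ===== CLAIM (what is proved, stated in full; the proofs are below) =====
def Claim_equal_numberOfArrays : Prop := ∀ (s : String) (k : Int), Dom_numberOfArrays s k → Pre_numberOfArrays s k → Spec_numberOfArrays s k (numberOfArrays s k)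

-- ===== LEMMAS AND PROOFS =====

-- a window is a usable block: nonempty, no leading zero, value in [1, k]
def pvOK (k : Int) (w : List Char) : Bool :=
  match w with
  | [] => false
  | c :: cs =>
    if c = '0' then false
    else decide (1 ≤ (PySem.Int.ofChars? (c :: cs)).getD 0 ∧ (PySem.Int.ofChars? (c :: cs)).getD 0 ≤ k)

-- number of splits of l into usable blocks, by the FIRST block (B's decomposition)
def pvF (k : Int) (d : Nat) (l : List Char) : Int :=
  if l.length = 0 then 1
  else ∑ L ∈ Finset.Icc 1 d,
    if h : 1 ≤ L ∧ L ≤ l.length ∧ pvOK k (l.take L) = true then pvF k d (l.drop L) else 0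
termination_by l.length
decreasing_by simp; omega

-- number of splits of l into usable blocks, by the LAST block (A's decomposition)
def pvG (k : Int) (d : Nat) (l : List Char) : Int :=
  if l.length = 0 then 1
  else ∑ L ∈ Finset.Icc 1 d,
    if h : 1 ≤ L ∧ L ≤ l.length ∧ pvOK k (l.drop (l.length - L)) = true then pvG k d (l.take (l.length - L)) else 0
termination_by l.length
decreasing_by simp; omega


lemma pvF_eq (k : Int) (d : Nat) (l : List Char) (h : l.length ≠ 0) :
    pvF k d l = ∑ L ∈ Finset.Icc 1 d,
      if L ≤ l.length ∧ pvOK k (l.take L) = true then pvF k d (l.drop L) else 0 := by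
  rw [pvF, if_neg h]
  refine Finset.sum_congr rfl (fun L hL => ?_)
  simp only [Finset.mem_Icc] at hL
  by_cases hc : L ≤ l.length ∧ pvOK k (l.take L) = true
  · rw [dif_pos ⟨hL.1, hc.1, hc.2⟩, if_pos hc]
  · rw [dif_neg (by rintro ⟨-, h2, h3⟩; exact hc ⟨h2, h3⟩), if_neg hc]

lemma pvG_eq (k : Int) (d : Nat) (l : List Char) (h : l.length ≠ 0) :
    pvG k d l = ∑ M ∈ Finset.Icc 1 d,
      if M ≤ l.length ∧ pvOK k (l.drop (l.length - M)) = true then pvG k d (l.take (l.length - M)) else 0 := by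
  rw [pvG, if_neg h]
  refine Finset.sum_congr rfl (fun M hM => ?_)
  simp only [Finset.mem_Icc] at hM
  by_cases hc : M ≤ l.length ∧ pvOK k (l.drop (l.length - M)) = true
  · rw [dif_pos ⟨hM.1, hc.1, hc.2⟩, if_pos hc]
  · rw [dif_neg (by rintro ⟨-, h2, h3⟩; exact hc ⟨h2, h3⟩), if_neg hc]

lemma pvF_expand (k : Int) (d : Nat) (l : List Char) (n : Nat) (hn : l.length = n) (h0 : n ≠ 0)
    (IH : ∀ l' : List Char, l'.length < n → pvF k d l' = pvG k d l') :
    pvF k d l =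
      (∑ L ∈ Finset.Icc 1 d, ∑ M ∈ Finset.Icc 1 d,
        if L + M ≤ n ∧ pvOK k (l.take L) = true ∧ pvOK k (l.drop (n - M)) = true
        then pvG k d ((l.take (n - M)).drop L) else 0)
      + (if n ∈ Finset.Icc 1 d ∧ pvOK k l = true then 1 else 0) := by
  have hb : (if n ∈ Finset.Icc 1 d ∧ pvOK k l = true then (1 : Int) else 0)
      = ∑ L ∈ Finset.Icc 1 d, if L = n then (if pvOK k l = true then (1 : Int) else 0) else 0 := by
    rw [Finset.sum_ite_eq' (Finset.Icc 1 d) n (fun _ => if pvOK k l = true then (1 : Int) else 0)]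
    by_cases h1 : n ∈ Finset.Icc 1 d <;> by_cases h2 : pvOK k l = true <;> simp [h1, h2]
  rw [hb, ← Finset.sum_add_distrib, pvF_eq k d l (by omega), hn]
  refine Finset.sum_congr rfl (fun L hL => ?_)
  simp only [Finset.mem_Icc] at hL
  by_cases h1 : L ≤ n ∧ pvOK k (l.take L) = true
  · rw [if_pos h1]
    rcases Nat.lt_or_eq_of_le h1.1 with hLn | hLn
    · -- L < n : expand pvF (l.drop L) through IH and pvG_eq
      have hdl : (l.drop L).length = n - L := by simp [hn]
      rw [IH (l.drop L) (by omega), pvG_eq k d (l.drop L) (by omega),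
        if_neg (by omega : ¬ L = n), add_zero]
      refine Finset.sum_congr rfl (fun M hM => ?_)
      simp only [Finset.mem_Icc] at hM
      by_cases h2 : L + M ≤ n
      · have e1 : (l.drop L).drop ((l.drop L).length - M) = l.drop (n - M) := by
          rw [List.drop_drop, hdl]; congr 1; omega
        have e2 : (l.drop L).take ((l.drop L).length - M) = (l.take (n - M)).drop L := by
          rw [List.drop_take, hdl]; congr 1; omega
        rw [e1, e2]
        by_cases h3 : pvOK k (l.drop (n - M)) = true
        · rw [if_pos ⟨by omega, h3⟩, if_pos ⟨h2, h1.2, h3⟩]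
        · rw [if_neg (by tauto), if_neg (by tauto)]
      · rw [if_neg (by rw [hdl]; rintro ⟨h3, -⟩; omega), if_neg (by rintro ⟨h3, -⟩; omega)]
    · -- L = n : the whole string is one block, counted by the boundary term
      subst hLn
      have hdrop : l.drop L = [] := List.drop_eq_nil_iff.mpr (by omega)
      have hFnil : pvF k d ([] : List Char) = 1 := by rw [pvF]; simp
      rw [hdrop, hFnil]
      have hokl : pvOK k l = true := by
        have h2 := h1.2; rwa [← hn, List.take_length] at h2
      rw [Finset.sum_eq_zero (fun M hM => by
            simp only [Finset.mem_Icc] at hM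
            rw [if_neg]; rintro ⟨h3, -⟩; omega)]
      rw [if_pos rfl, if_pos hokl, zero_add]
  · have hbnd : (if L = n then (if pvOK k l = true then (1 : Int) else 0) else 0) = 0 := by
      split_ifs with hLn hok
      · exact absurd ⟨by omega, by rwa [hLn, ← hn, List.take_length]⟩ h1
      · rfl
      · rfl
    rw [if_neg h1,
      Finset.sum_eq_zero (fun M hM => by
        simp only [Finset.mem_Icc] at hM
        rw [if_neg]; rintro ⟨h2, h3, -⟩; exact h1 ⟨by omega, h3⟩),
      hbnd, add_zero]

lemma pvG_expand (k : Int) (d : Nat) (l : List Char) (n : Nat) (hn : l.length = n) (h0 : n ≠ 0)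
    (IH : ∀ l' : List Char, l'.length < n → pvF k d l' = pvG k d l') :
    pvG k d l =
      (∑ M ∈ Finset.Icc 1 d, ∑ L ∈ Finset.Icc 1 d,
        if L + M ≤ n ∧ pvOK k (l.take L) = true ∧ pvOK k (l.drop (n - M)) = true
        then pvG k d ((l.take (n - M)).drop L) else 0)
      + (if n ∈ Finset.Icc 1 d ∧ pvOK k l = true then 1 else 0) := by
  have hb : (if n ∈ Finset.Icc 1 d ∧ pvOK k l = true then (1 : Int) else 0)
      = ∑ M ∈ Finset.Icc 1 d, if M = n then (if pvOK k l = true then (1 : Int) else 0) else 0 := by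
    rw [Finset.sum_ite_eq' (Finset.Icc 1 d) n (fun _ => if pvOK k l = true then (1 : Int) else 0)]
    by_cases h1 : n ∈ Finset.Icc 1 d <;> by_cases h2 : pvOK k l = true <;> simp [h1, h2]
  rw [hb, ← Finset.sum_add_distrib, pvG_eq k d l (by omega), hn]
  refine Finset.sum_congr rfl (fun M hM => ?_)
  simp only [Finset.mem_Icc] at hM
  by_cases h1 : M ≤ n ∧ pvOK k (l.drop (n - M)) = true
  · rw [if_pos h1]
    rcases Nat.lt_or_eq_of_le h1.1 with hMn | hMn
    · -- M < n : expand pvG (l.take (n - M)) through IH and pvF_eq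
      have htl : (l.take (n - M)).length = n - M := by
        rw [List.length_take, hn]; omega
      rw [← IH (l.take (n - M)) (by omega), pvF_eq k d _ (by omega),
        if_neg (by omega : ¬ M = n), add_zero]
      refine Finset.sum_congr rfl (fun L hL => ?_)
      simp only [Finset.mem_Icc] at hL
      by_cases h2 : L + M ≤ n
      · have e1 : (l.take (n - M)).take L = l.take L := by
          rw [List.take_take]; congr 1; omega
        rw [e1, IH ((l.take (n - M)).drop L) (by rw [List.length_drop, htl]; omega)]
        by_cases h3 : pvOK k (l.take L) = true
        · rw [if_pos ⟨by omega, h3⟩, if_pos ⟨h2, h3, h1.2⟩]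
        · rw [if_neg (by tauto), if_neg (by tauto)]
      · rw [if_neg (by rw [htl]; rintro ⟨h3, -⟩; omega), if_neg (by rintro ⟨h3, -⟩; omega)]
    · -- M = n : the whole string is one block, counted by the boundary term
      subst hMn
      have hGnil : pvG k d ([] : List Char) = 1 := by rw [pvG]; simp
      rw [Nat.sub_self, List.take_zero, hGnil]
      have hokl : pvOK k l = true := by
        have h2 := h1.2; rwa [Nat.sub_self, List.drop_zero] at h2
      rw [Finset.sum_eq_zero (fun L hL => by
            simp only [Finset.mem_Icc] at hL
            rw [if_neg]; rintro ⟨h3, -⟩; omega)]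
      rw [if_pos rfl, if_pos hokl, zero_add]
  · have hbnd : (if M = n then (if pvOK k l = true then (1 : Int) else 0) else 0) = 0 := by
      split_ifs with hMn hok
      · exact absurd ⟨by omega, by rwa [hMn, Nat.sub_self, List.drop_zero]⟩ h1
      · rfl
      · rfl
    rw [if_neg h1,
      Finset.sum_eq_zero (fun L hL => by
        simp only [Finset.mem_Icc] at hL
        rw [if_neg]; rintro ⟨h2, -, h3⟩; exact h1 ⟨by omega, h3⟩),
      hbnd, add_zero]

theorem pvFG (k : Int) (d : Nat) (l : List Char) : pvF k d l = pvG k d l := by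
  generalize hn : l.length = n
  induction n using Nat.strong_induction_on generalizing l with
  | _ n IH =>
    by_cases h0 : n = 0
    · subst h0
      have hl : l = [] := List.length_eq_zero_iff.mp hn
      subst hl
      have h1 : pvF k d ([] : List Char) = 1 := by rw [pvF]; simp
      have h2 : pvG k d ([] : List Char) = 1 := by rw [pvG]; simp
      rw [h1, h2]
    · have IH' : ∀ l' : List Char, l'.length < n → pvF k d l' = pvG k d l' :=
        fun l' h => IH l'.length (by omega) l' rfl
      rw [pvF_expand k d l n hn h0 IH', pvG_expand k d l n hn h0 IH', Finset.sum_comm]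


lemma pvGetDSetNe (dp : List Int) (i j : Nat) (v : Int) (h : i ≠ j) :
    (dp.set i v).getD j 0 = dp.getD j 0 := by
  simp [List.getD_eq_getElem?_getD, List.getElem?_set_ne h]

lemma pvGetDSetSelf (dp : List Int) (i : Nat) (v : Int) (h : i < dp.length) :
    (dp.set i v).getD i 0 = v := by
  simp [List.getD_eq_getElem?_getD, h]

lemma pvSetGetDSelf (dp : List Int) (i : Nat) (h : i < dp.length) :
    dp.set i (dp.getD i 0) = dp := by
  rw [List.getD_eq_getElem dp 0 h]; exact List.set_getElem_self h

-- the contribution of window length j+1 (ending at position i) to dp[i] in A's inner loop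
def pvATerm (l : List Char) (k : Int) (i : Nat) (dp : List Int) (j : Nat) : Int :=
  if j ≤ i ∧ pvOK k ((l.drop (i - j)).take (j + 1)) = true then
    (if j < i then dp.getD (i - j - 1) 0 else 1) else 0

lemma pvATerm_set (l : List Char) (k : Int) (i : Nat) (dp : List Int) (v : Int) (j : Nat) :
    pvATerm l k i (dp.set i v) j = pvATerm l k i dp j := by
  unfold pvATerm
  split_ifs with h1 h2
  · rw [pvGetDSetNe dp i (i - j - 1) v (by omega)]
  · rfl
  · rfl

lemma pvAInner_spec (l : List Char) (k : Int) (dT : Nat) (i : Nat) (hi : i < l.length) :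
    ∀ (fuel j0 : Nat), dT - j0 = fuel → ∀ dp : List Int, dp.length = l.length →
      pvAInner l k (i : Int) dp (PySem.List.pyRange (j0 : Int) (dT : Int) 1) =
      dp.set i (dp.getD i 0 + ∑ j ∈ Finset.Ico j0 dT, pvATerm l k i dp j) := by
  intro fuel
  induction fuel with
  | zero =>
    intro j0 hfe dp hdp
    rw [PySem.List.pyRange_one_eq_nil (by exact_mod_cast Nat.le_of_sub_eq_zero hfe)]
    rw [Finset.Ico_eq_empty (by omega), Finset.sum_empty, add_zero,
      pvSetGetDSelf dp i (by omega)]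
    rfl
  | succ m ih =>
    intro j0 hfe dp hdp
    have hj0 : j0 < dT := by omega
    rw [PySem.List.pyRange_one_cons (by exact_mod_cast hj0)]
    have hp1 : ((j0 : Int) + 1) = ((j0 + 1 : Nat) : Int) := by push_cast; ring
    rw [Finset.sum_eq_sum_Ico_succ_bot hj0]
    by_cases hij : i < j0
    · -- break: i - j0 < 0
      show (if (i : Int) - (j0 : Int) < 0 then dp else _) = _
      rw [if_pos (by omega)]
      have hz : ∀ j ∈ Finset.Ico (j0 + 1) dT, pvATerm l k i dp j = 0 := by
        intro j hj
        simp only [Finset.mem_Ico] at hj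
        unfold pvATerm
        rw [if_neg (by rintro ⟨h1, -⟩; omega)]
      rw [Finset.sum_eq_zero hz]
      unfold pvATerm
      rw [if_neg (by rintro ⟨h1, -⟩; omega)]
      rw [add_zero, add_zero, pvSetGetDSelf dp i (by omega)]
    · -- j0 ≤ i : the window l[i-j0 : i+1] is examined
      have hij' : j0 ≤ i := by omega
      have hc1 : ((i : Int) - (j0 : Int)) = ((i - j0 : Nat) : Int) := by omega
      have hc2 : ((i : Int) + 1) = ((i + 1 : Nat) : Int) := by omega
      have hwin : PySem.List.slice l (some ((i : Int) - (j0 : Int))) (some ((i : Int) + 1))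
          = (l.drop (i - j0)).take (j0 + 1) := by
        rw [hc1, hc2, PySem.List.slice_natCast]; congr 1; omega
      have hne : (l.drop (i - j0)).take (j0 + 1) ≠ [] := by
        simp only [ne_eq, List.take_eq_nil_iff, List.drop_eq_nil_iff]; omega
      obtain ⟨c, cs, hccs⟩ := List.exists_cons_of_ne_nil hne
      show (if (i : Int) - (j0 : Int) < 0 then dp else _) = _
      rw [if_neg (by omega)]
      simp only [hwin, hccs, PySem.List.pyGet?_zero_cons, Option.getD_some]
      by_cases hc : c = '0'
      · -- continue
        rw [if_pos hc, hp1, ih (j0 + 1) (by omega) dp hdp]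
        have ht0 : pvATerm l k i dp j0 = 0 := by
          unfold pvATerm
          rw [if_neg (by rintro ⟨-, h2⟩; rw [hccs] at h2; simp [pvOK, hc] at h2)]
        rw [ht0, zero_add]
      · rw [if_neg hc]
        set v := (PySem.Int.ofChars? (c :: cs)).getD 0 with hv
        by_cases hvk : 1 ≤ v ∧ v ≤ k
        · -- dp[i] += (dp[i-j0-1] if i-j0-1 >= 0 else 1)
          rw [if_pos hvk]
          have hokw : pvOK k ((l.drop (i - j0)).take (j0 + 1)) = true := by
            rw [hccs]; simp [pvOK, hc, ← hv, hvk.1, hvk.2]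
          have haddc : (if (0 : Int) ≤ (i : Int) - (j0 : Int) - 1
                then PySem.List.pyGetD dp ((i : Int) - (j0 : Int) - 1) 0 else 1)
              = (if j0 < i then dp.getD (i - j0 - 1) 0 else 1) := by
            by_cases hlt : j0 < i
            · rw [if_pos (by omega), if_pos hlt]
              have : ((i : Int) - (j0 : Int) - 1) = ((i - j0 - 1 : Nat) : Int) := by omega
              rw [this, PySem.List.pyGetD_natCast]
            · rw [if_neg (by omega), if_neg hlt]
          rw [haddc, PySem.List.pyGetD_natCast, PySem.List.pySetD_natCast, hp1,
            ih (j0 + 1) (by omega) (dp.set i _) (by rw [List.length_set]; exact hdp)]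
          have ht : pvATerm l k i dp j0 = (if j0 < i then dp.getD (i - j0 - 1) 0 else 1) := by
            unfold pvATerm; rw [if_pos ⟨hij', hokw⟩]
          rw [Finset.sum_congr rfl (fun j _ => pvATerm_set l k i dp _ j),
            pvGetDSetSelf dp i _ (by omega), List.set_set, ht]
          ring_nf
        · rw [if_neg hvk, hp1, ih (j0 + 1) (by omega) dp hdp]
          have ht0 : pvATerm l k i dp j0 = 0 := by
            unfold pvATerm
            rw [if_neg (by
              rintro ⟨-, h2⟩
              rw [hccs] at h2
              simp [pvOK, hc, ← hv] at h2
              exact hvk ⟨h2.1, h2.2⟩)]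
          rw [ht0, zero_add]

lemma pvIccShift (dT : Nat) (g h : Nat → Int) (hg : ∀ j, j < dT → h j = g (j + 1)) :
    ∑ L ∈ Finset.Icc 1 dT, g L = ∑ j ∈ Finset.Ico 0 dT, h j := by
  rw [← Finset.Ico_add_one_right_eq_Icc, Finset.sum_Ico_eq_sum_range, Finset.sum_Ico_eq_sum_range]
  simp only [Nat.add_sub_cancel, Nat.sub_zero]
  refine Finset.sum_congr rfl (fun j hj => ?_)
  simp only [Finset.mem_range] at hj
  rw [Nat.zero_add, hg j hj]; congr 1; omega

-- A's dp table after the first m outer iterations: dp[t] = pvG (l.take (t+1)) for t < m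
def pvDP (k : Int) (dT : Nat) (l : List Char) (m : Nat) : List Int :=
  (List.range l.length).map (fun t => if t < m then pvG k dT (l.take (t + 1)) else 0)

lemma pvDP_length (k : Int) (dT : Nat) (l : List Char) (m : Nat) :
    (pvDP k dT l m).length = l.length := by simp [pvDP]

lemma pvDP_getD (k : Int) (dT : Nat) (l : List Char) (m t : Nat) (ht : t < l.length) :
    (pvDP k dT l m).getD t 0 = if t < m then pvG k dT (l.take (t + 1)) else 0 := by
  simp [pvDP, List.getD_eq_getElem?_getD, ht]

lemma pvDP_set (k : Int) (dT : Nat) (l : List Char) (m : Nat) (hm : m < l.length) :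
    (pvDP k dT l m).set m (pvG k dT (l.take (m + 1))) = pvDP k dT l (m + 1) := by
  apply List.ext_getElem (by simp [pvDP])
  intro t h1 h2
  simp only [List.length_set, pvDP, List.length_map, List.length_range] at h1 h2
  rw [List.getElem_set]
  simp only [pvDP, List.getElem_map, List.getElem_range]
  split_ifs with e1 e2 e3 e4 e5 <;> first
    | rfl
    | (try subst e1); omega
    | (subst e1; rfl)

lemma pvAStep (k : Int) (dT : Nat) (l : List Char) (m : Nat) (hm : m < l.length) :
    pvAInner l k ((m : Nat) : Int) (pvDP k dT l m) (PySem.List.pyRange ((0 : Nat) : Int) (dT : Int) 1)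
      = pvDP k dT l (m + 1) := by
  rw [pvAInner_spec l k dT m hm dT 0 (by omega) (pvDP k dT l m) (pvDP_length k dT l m)]
  rw [pvDP_getD k dT l m m hm, if_neg (lt_irrefl m), zero_add, ← pvDP_set k dT l m hm]
  congr 1
  have hlen : (l.take (m + 1)).length = m + 1 := by
    rw [List.length_take]; omega
  rw [pvG_eq k dT (l.take (m + 1)) (by omega), hlen]
  refine (pvIccShift dT _ _ ?_).symm
  intro j hj
  have hGnil : pvG k dT ([] : List Char) = 1 := by rw [pvG]; simp
  have hterm : pvATerm l k m (pvDP k dT l m) j =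
      (if j ≤ m ∧ pvOK k ((l.drop (m - j)).take (j + 1)) = true
        then pvG k dT (l.take (m - j)) else 0) := by
    unfold pvATerm
    by_cases hc : j ≤ m ∧ pvOK k ((l.drop (m - j)).take (j + 1)) = true
    · rw [if_pos hc, if_pos hc]
      by_cases hjlt : j < m
      · have hx1 : m - j - 1 < l.length := by omega
        have hx2 : m - j - 1 < m := by omega
        have hx3 : m - j - 1 + 1 = m - j := by omega
        rw [if_pos hjlt, pvDP_getD k dT l m (m - j - 1) hx1, if_pos hx2, hx3]
      · have hje : j = m := by omega
        subst hje
        rw [if_neg hjlt, Nat.sub_self, List.take_zero, hGnil]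
    · rw [if_neg hc, if_neg hc]
  rw [hterm]
  by_cases hjm : j ≤ m
  · have e1 : m + 1 - (j + 1) = m - j := by omega
    have e2 : m + 1 - (m + 1 - (j + 1)) = j + 1 := by omega
    have e3 : min (m + 1 - (j + 1)) (m + 1) = m - j := by omega
    have hwin : (l.take (m + 1)).drop (m + 1 - (j + 1)) = (l.drop (m - j)).take (j + 1) := by
      rw [List.drop_take, e2, e1]
    have hmid : (l.take (m + 1)).take (m + 1 - (j + 1)) = l.take (m - j) := by
      rw [List.take_take, e3]
    rw [hwin, hmid]
    refine if_congr ?_ rfl rfl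
    constructor <;> rintro ⟨h1, h2⟩ <;> exact ⟨by omega, h2⟩
  · rw [if_neg (by rintro ⟨h1, -⟩; omega), if_neg (by rintro ⟨h1, -⟩; omega)]

lemma pvAFold (k : Int) (dT : Nat) (l : List Char) :
    ∀ m, m ≤ l.length →
      (PySem.List.pyRange 0 ((m : Nat) : Int) 1).foldl
        (fun dp i => pvAInner l k i dp (PySem.List.pyRange 0 (dT : Int) 1))
        (List.replicate l.length 0)
      = pvDP k dT l m := by
  intro m
  induction m with
  | zero =>
    intro _
    rw [show (((0 : Nat) : Int)) = (0 : Int) by simp, PySem.List.pyRange_one_eq_nil le_rfl]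
    simp [pvDP, List.map_const']
  | succ m ihm =>
    intro hm
    have hcast : (((m + 1 : Nat)) : Int) = ((m : Nat) : Int) + 1 := by push_cast; ring
    rw [hcast, PySem.List.pyRange_one_succ_right (by positivity), List.foldl_append,
      ihm (by omega)]
    simp only [List.foldl_cons, List.foldl_nil]
    have h0 : (PySem.List.pyRange 0 (dT : Int) 1) = (PySem.List.pyRange ((0 : Nat) : Int) (dT : Int) 1) := by norm_num
    rw [h0, pvAStep k dT l m (by omega)]

-- B's f table after processing positions ≥ i0: f[t] = pvF (l.drop t) for t ≥ i0
def pvFS (k : Int) (dT : Nat) (l : List Char) (i0 : Nat) : List Int :=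
  (List.range (l.length + 1)).map (fun t => if i0 ≤ t then pvF k dT (l.drop t) else 0)

lemma pvFS_length (k : Int) (dT : Nat) (l : List Char) (i0 : Nat) :
    (pvFS k dT l i0).length = l.length + 1 := by simp [pvFS]

lemma pvFS_getD (k : Int) (dT : Nat) (l : List Char) (i0 t : Nat) (ht : t < l.length + 1) :
    (pvFS k dT l i0).getD t 0 = if i0 ≤ t then pvF k dT (l.drop t) else 0 := by
  simp [pvFS, List.getD_eq_getElem?_getD, ht]

lemma pvF_head0 (k : Int) (dT : Nat) (l : List Char) (i : Nat) (hi : i < l.length)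
    (hc : l[i] = '0') : pvF k dT (l.drop i) = 0 := by
  rw [pvF_eq k dT (l.drop i) (by simp; omega)]
  refine Finset.sum_eq_zero (fun L hL => ?_)
  simp only [Finset.mem_Icc] at hL
  rw [if_neg]
  rintro ⟨-, h2⟩
  obtain ⟨L', rfl⟩ : ∃ L', L = L' + 1 := ⟨L - 1, by omega⟩
  rw [List.drop_eq_getElem_cons hi, List.take_succ_cons, hc] at h2
  simp [pvOK] at h2

lemma pvFS_set (k : Int) (dT : Nat) (l : List Char) (i : Nat) (hi : i < l.length) :
    (pvFS k dT l (i + 1)).set i (pvF k dT (l.drop i)) = pvFS k dT l i := by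
  apply List.ext_getElem (by simp [pvFS])
  intro t h1 h2
  simp only [List.length_set, pvFS, List.length_map, List.length_range] at h1 h2
  rw [List.getElem_set]
  simp only [pvFS, List.getElem_map, List.getElem_range]
  split_ifs with e1 e2 e3 e4 e5 <;> first
    | rfl
    | (try subst e1); omega
    | (subst e1; rfl)

lemma pvFS_skip (k : Int) (dT : Nat) (l : List Char) (i : Nat) (hi : i < l.length)
    (hc : l[i] = '0') : pvFS k dT l (i + 1) = pvFS k dT l i := by
  rw [← pvFS_set k dT l i hi, pvF_head0 k dT l i hi hc]
  apply List.ext_getElem (by simp [pvFS])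
  intro t h1 h2
  simp only [pvFS, List.length_map, List.length_range] at h1 h2
  rw [List.getElem_set]
  simp only [pvFS, List.getElem_map, List.getElem_range]
  split_ifs with e1 e2 e3 <;> first
    | rfl
    | omega
    | (subst e1; omega)

lemma pvFS_base (k : Int) (dT : Nat) (l : List Char) :
    (List.replicate (l.length + 1) (0 : Int)).set l.length 1 = pvFS k dT l l.length := by
  apply List.ext_getElem (by simp [pvFS])
  intro t h1 h2
  simp only [List.length_set, List.length_replicate, pvFS, List.length_map,
    List.length_range] at h1 h2
  rw [List.getElem_set]
  simp only [pvFS, List.getElem_map, List.getElem_range, List.getElem_replicate]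
  have hFnil : pvF k dT ([] : List Char) = 1 := by rw [pvF]; simp
  split_ifs with e1 e2 e3
  · rw [← e1, List.drop_length, hFnil]
  · omega
  · omega
  · rfl

-- ===== digit-string semantics of int(): a transparent copy of the private parser =====

-- myGo mirrors the private digit-parsing loop of PySem.Int.ofChars?
def myGo : List Char → Bool → Nat → Option Nat
  | [], afterDigit, _acc => if afterDigit = true then some _acc else none
  | c :: rest, afterDigit, acc =>
    if c.isDigit = true then myGo rest true (acc * 10 + (c.toNat - '0'.toNat))
    else
      if c = '_' ∧ afterDigit = true then
        match rest with
        | d :: _ => if d.isDigit = true then myGo rest false acc else none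
        | [] => none
      else none

lemma myGo_cons_digit (c : Char) (r : List Char) (a : Bool) (n : Nat) (hd : c.isDigit = true) :
    myGo (c :: r) a n = myGo r true (n * 10 + (c.toNat - '0'.toNat)) := by
  conv_lhs => rw [myGo.eq_def]
  simp [hd]

-- any function satisfying the recursion of the private parser loop IS myGo
lemma goAbs (G : List Char → Bool → Nat → Option Nat)
    (h0 : ∀ a n, G [] a n = if a = true then some n else none)
    (hA : ∀ c r a n, c.isDigit = true → G (c::r) a n = G r true (n*10+(c.toNat-'0'.toNat)))
    (hB : ∀ c r a n, c.isDigit = false → ¬(c = '_' ∧ a = true) → G (c::r) a n = none)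
    (hC : ∀ c a n, c.isDigit = false → (c = '_' ∧ a = true) → G [c] a n = none)
    (hD : ∀ c e t a n, c.isDigit = false → (c = '_' ∧ a = true) → e.isDigit = true → G (c::e::t) a n = G (e::t) false n)
    (hE : ∀ c e t a n, c.isDigit = false → (c = '_' ∧ a = true) → e.isDigit = false → G (c::e::t) a n = none) :
    ∀ l a n, G l a n = myGo l a n := by
  intro l
  induction l with
  | nil => intro a n; rw [h0]; rfl
  | cons c r ih =>
    intro a n
    by_cases hd : c.isDigit
    · rw [hA c r a n hd, ih]; conv_rhs => rw [myGo.eq_def]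
      simp [hd]
    · by_cases hu : c = '_' ∧ a = true
      · cases r with
        | nil =>
          rw [hC c a n (by simpa using hd) hu]; conv_rhs => rw [myGo.eq_def]
          simp [hu]
        | cons e t =>
          by_cases he : e.isDigit
          · rw [hD c e t a n (by simpa using hd) hu he, ih]; conv_rhs => rw [myGo.eq_def]
            simp [hu, he]
          · rw [hE c e t a n (by simpa using hd) hu (by simpa using he)]; conv_rhs => rw [myGo.eq_def]
            simp [hu, (by simpa using he : e.isDigit = false)]
      · rw [hB c r a n (by simpa using hd) hu]; conv_rhs => rw [myGo.eq_def]
        simp [hu, (by simpa using hd : c.isDigit = false)]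

-- numeric value of a digit string
def natVal (w : List Char) : Nat := w.foldl (fun a c => a * 10 + (c.toNat - '0'.toNat)) 0

lemma charDigitBounds (c : Char) (hc : c.isDigit = true) : 48 ≤ c.toNat ∧ c.toNat ≤ 57 := by
  simp only [Char.isDigit, Bool.and_eq_true, decide_eq_true_eq] at hc
  obtain ⟨h1, h2⟩ := hc
  exact ⟨h1, h2⟩

lemma isIntSpace_digit (c : Char) (hc : c.isDigit = true) : PySem.Int.isIntSpace c = false := by
  have hb := charDigitBounds c hc
  simp only [PySem.Int.isIntSpace, Bool.or_eq_false_iff, decide_eq_false_iff_not]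
  refine ⟨⟨⟨⟨⟨?_, ?_⟩, ?_⟩, ?_⟩, ?_⟩, ?_⟩ <;>
    (rintro rfl; revert hb; decide)

lemma dropWhile_digits (p : Char → Bool) (l : List Char)
    (hl : ∀ c ∈ l, p c = false) : List.dropWhile p l = l := by
  cases l with
  | nil => rfl
  | cons c t => rw [List.dropWhile_cons_of_neg (by simp [hl c List.mem_cons_self])]

lemma myGo_digits (t : List Char) : ∀ acc, (∀ c ∈ t, c.isDigit = true) →
    myGo t true acc = some (t.foldl (fun a c => a * 10 + (c.toNat - '0'.toNat)) acc) := by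
  induction t with
  | nil => intro acc _; rfl
  | cons c r ih =>
    intro acc hdig
    rw [myGo_cons_digit c r true acc (hdig c List.mem_cons_self),
      ih _ (fun x hx => hdig x (List.mem_cons_of_mem _ hx)), List.foldl_cons]

-- int() on a nonempty all-digit string returns its value
lemma ofChars?_digits (w : List Char) (hw : w ≠ []) (hdig : ∀ c ∈ w, c.isDigit = true) :
    PySem.Int.ofChars? w = some ((natVal w : Nat) : Int) := by
  obtain ⟨c, t, rfl⟩ := List.exists_cons_of_ne_nil hw
  have hc : c.isDigit = true := hdig c List.mem_cons_self
  have hd1 : List.dropWhile PySem.Int.isIntSpace (c :: t) = c :: t :=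
    dropWhile_digits _ _ (fun x hx => isIntSpace_digit x (hdig x hx))
  have hd2 : List.dropWhile PySem.Int.isIntSpace (c :: t).reverse = (c :: t).reverse :=
    dropWhile_digits _ _ (fun x hx => isIntSpace_digit x (hdig x (by
      rw [← List.mem_reverse]; exact hx)))
  have hne : c ≠ '-' := by rintro rfl; revert hc; decide
  have hpl : c ≠ '+' := by rintro rfl; revert hc; decide
  simp only [PySem.Int.ofChars?, hd1, hd2, List.reverse_reverse]
  split
  case _ ds heq => exact absurd (List.cons.injEq .. ▸ heq) (by simp [hne])
  case _ ds heq => exact absurd (List.cons.injEq .. ▸ heq) (by simp [hpl])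
  case _ =>
    show _ = some ((natVal (c :: t) : Nat) : Int)
    have hMg : myGo (c :: t) false 0 = some (natVal (c :: t)) := by
      rw [myGo_cons_digit c t false 0 hc,
        myGo_digits t (0 * 10 + (c.toNat - '0'.toNat)) (fun x hx => hdig x (List.mem_cons_of_mem _ hx))]
      rfl
    have hmb : ∀ (X : Option Nat), (Option.map (fun n : Int => n) (do let a ← X; pure (a : Int))) = Option.map (fun n : Nat => (n : Int)) X := by
      intro X; cases X <;> rfl
    have hfin : Option.map (fun n : Nat => (n : Int)) (myGo (c :: t) false 0) = some ((natVal (c :: t) : Nat) : Int) := by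
      rw [hMg]; rfl
    rw [← hfin, ← hmb]
    congr 1
    congr 1
    conv_lhs => whnf
    rw [hc]
    conv_lhs => whnf
    rw [myGo_cons_digit c t false 0 hc]
    refine goAbs _ ?_ ?_ ?_ ?_ ?_ ?_ t true (0 * 10 + (c.toNat - '0'.toNat))
    · intro a n
      cases a <;> rfl
    · intro c' r a n hd'
      conv_lhs => whnf
      rw [hd']
      conv_lhs => whnf
    · intro c' r a n hd' hu'
      conv_lhs => whnf
      rw [hd']
      conv_lhs => whnf
      rw [show (instDecidableAnd : Decidable (c' = '_' ∧ a = true)) = isFalse hu' from Subsingleton.elim _ _]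
    · intro c' a n hd' hu'
      conv_lhs => whnf
      rw [hd']
      conv_lhs => whnf
      rw [show (instDecidableAnd : Decidable (c' = '_' ∧ a = true)) = isTrue hu' from Subsingleton.elim _ _]
    · intro c' e t' a n hd' hu' he
      conv_lhs => whnf
      rw [hd']
      conv_lhs => whnf
      rw [show (instDecidableAnd : Decidable (c' = '_' ∧ a = true)) = isTrue hu' from Subsingleton.elim _ _]
      conv_lhs => whnf
      rw [show (instDecidableEqBool e.isDigit true : Decidable (e.isDigit = true)) = isTrue he from Subsingleton.elim _ _]
    · intro c' e t' a n hd' hu' he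
      conv_lhs => whnf
      rw [hd']
      conv_lhs => whnf
      rw [show (instDecidableAnd : Decidable (c' = '_' ∧ a = true)) = isTrue hu' from Subsingleton.elim _ _]
      conv_lhs => whnf
      rw [show (instDecidableEqBool e.isDigit true : Decidable (e.isDigit = true)) = isFalse (by simp [he]) from Subsingleton.elim _ _]


-- ===== arithmetic facts about natVal, and the digit-string order =====

lemma natValAcc (u : List Char) : ∀ acc : Nat,
    u.foldl (fun a x => a * 10 + (x.toNat - '0'.toNat)) acc = acc * 10 ^ u.length + natVal u := by
  induction u with
  | nil => intro acc; simp [natVal]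
  | cons x r ih =>
    intro acc
    rw [List.foldl_cons, ih]
    have hx : natVal (x :: r) = (x.toNat - '0'.toNat) * 10 ^ r.length + natVal r := by
      show List.foldl _ 0 (x :: r) = _
      rw [List.foldl_cons, ih]
      simp
    rw [hx, List.length_cons, pow_succ]
    ring

lemma natVal_cons (c : Char) (t : List Char) :
    natVal (c :: t) = (c.toNat - '0'.toNat) * 10 ^ t.length + natVal t := by
  show List.foldl _ 0 (c :: t) = _
  rw [List.foldl_cons, natValAcc]
  simp

lemma natVal_lt (t : List Char) (hdig : ∀ c ∈ t, c.isDigit = true) :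
    natVal t < 10 ^ t.length := by
  induction t with
  | nil => simp [natVal]
  | cons c r ih =>
    have hb := charDigitBounds c (hdig c List.mem_cons_self)
    have hr := ih (fun x hx => hdig x (List.mem_cons_of_mem _ hx))
    rw [natVal_cons, List.length_cons, pow_succ]
    have h9 : c.toNat - '0'.toNat ≤ 9 := by
      have h48 : ('0' : Char).toNat = 48 := by decide
      omega
    calc (c.toNat - '0'.toNat) * 10 ^ r.length + natVal r
        ≤ 9 * 10 ^ r.length + natVal r := by
          have := Nat.mul_le_mul_right (10 ^ r.length) h9
          omega
      _ < 10 ^ r.length * 10 := by omega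

lemma charEqOfToNat (c d : Char) (h : c.toNat = d.toNat) : c = d :=
  Char.ext (UInt32.toNat_inj.mp h)

lemma natVal_ge (c : Char) (t : List Char) (hc : c.isDigit = true) (h0 : c ≠ '0') :
    10 ^ t.length ≤ natVal (c :: t) := by
  have hb := charDigitBounds c hc
  have h48 : c.toNat ≠ 48 := by
    intro h
    exact h0 (charEqOfToNat c '0' (by rw [h]; decide))
  rw [natVal_cons]
  have h1 : 1 ≤ c.toNat - '0'.toNat := by
    have : ('0' : Char).toNat = 48 := by decide
    omega
  calc 10 ^ t.length = 1 * 10 ^ t.length := by ring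
    _ ≤ (c.toNat - '0'.toNat) * 10 ^ t.length := Nat.mul_le_mul_right _ h1
    _ ≤ _ := Nat.le_add_right _ _

-- ===== characterization of str(k) = Nat.toDigits 10 k =====

def myToDig (n : Nat) : List Char :=
  if n < 10 then [Nat.digitChar n]
  else myToDig (n / 10) ++ [Nat.digitChar (n % 10)]
termination_by n
decreasing_by exact Nat.div_lt_self (by omega) (by omega)

lemma toDigitsCore_eq_myToDig : ∀ (f n : Nat) (ds : List Char), n < f →
    Nat.toDigitsCore 10 f n ds = myToDig n ++ ds := by
  intro f
  induction f with
  | zero => intro n ds h; omega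
  | succ f ih =>
    intro n ds h
    rw [Nat.toDigitsCore]
    by_cases h0 : n / 10 = 0
    · have hn10 : n < 10 := by omega
      simp only [h0]
      rw [myToDig, if_pos hn10, Nat.mod_eq_of_lt hn10]
      rfl
    · have hn10 : ¬ n < 10 := by omega
      simp only [if_neg h0]
      rw [ih (n / 10) _ (by omega)]
      conv_rhs => rw [myToDig, if_neg hn10]
      rw [List.append_assoc]
      rfl

lemma digitChar_spec (j : Nat) (hj : j < 10) :
    (Nat.digitChar j).isDigit = true ∧ (Nat.digitChar j).toNat - '0'.toNat = j := by
  interval_cases j <;> exact ⟨by decide, by decide⟩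

lemma natVal_append_singleton (u : List Char) (c : Char) :
    natVal (u ++ [c]) = natVal u * 10 + (c.toNat - '0'.toNat) := by
  show List.foldl _ 0 (u ++ [c]) = _
  rw [List.foldl_append]
  rfl

lemma myToDig_spec (m : Nat) (hm : 1 ≤ m) :
    ∃ c t, myToDig m = c :: t ∧ c ≠ '0' ∧ (∀ x ∈ c :: t, x.isDigit = true) ∧ natVal (c :: t) = m := by
  induction m using Nat.strong_induction_on with
  | _ m ih =>
    by_cases hlt : m < 10
    · refine ⟨Nat.digitChar m, [], by rw [myToDig, if_pos hlt], ?_, ?_, ?_⟩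
      · interval_cases m <;> decide
      · intro x hx
        simp only [List.mem_singleton] at hx
        subst hx
        exact (digitChar_spec m hlt).1
      · rw [show (Nat.digitChar m :: [] : List Char) = [] ++ [Nat.digitChar m] from rfl,
          natVal_append_singleton, (digitChar_spec m hlt).2]
        simp [natVal]
    · obtain ⟨c, t, heq, hc0, hdig, hval⟩ := ih (m / 10) (Nat.div_lt_self (by omega) (by omega)) (by omega)
      refine ⟨c, t ++ [Nat.digitChar (m % 10)], ?_, hc0, ?_, ?_⟩
      · rw [myToDig, if_neg hlt, heq]
        rfl
      · intro x hx
        simp only [List.mem_cons, List.mem_append] at hx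
        rcases hx with rfl | hx | rfl | h
        · exact hdig x List.mem_cons_self
        · exact hdig x (List.mem_cons_of_mem _ hx)
        · exact (digitChar_spec _ (Nat.mod_lt _ (by omega))).1
        · exact absurd h (List.not_mem_nil)
      · rw [show c :: (t ++ [Nat.digitChar (m % 10)]) = (c :: t) ++ [Nat.digitChar (m % 10)] from rfl,
          natVal_append_singleton, hval, (digitChar_spec _ (Nat.mod_lt _ (by omega))).2]
        omega

-- str(k) for k ≥ 1: a nonempty all-digit string with no leading zero and value k
lemma toChars_spec (k : Int) (hk : 1 ≤ k) :
    ∃ c t, PySem.Int.toChars k = c :: t ∧ c ≠ '0' ∧ (∀ x ∈ c :: t, x.isDigit = true) ∧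
      natVal (c :: t) = k.toNat := by
  have h1 : PySem.Int.toChars k = Nat.toDigits 10 k.toNat := by
    rw [PySem.Int.toChars, if_neg (by omega)]
  have h2 : Nat.toDigits 10 k.toNat = myToDig k.toNat := by
    rw [Nat.toDigits, toDigitsCore_eq_myToDig (k.toNat + 1) k.toNat [] (by omega), List.append_nil]
  obtain ⟨c, t, heq, hc0, hdig, hval⟩ := myToDig_spec k.toNat (by omega)
  exact ⟨c, t, by rw [h1, h2, heq], hc0, hdig, hval⟩


-- ===== pvOK in terms of length and lexicographic comparison =====

lemma pvOK_k0 (k : Int) (hk : k < 1) (w : List Char) : pvOK k w = false := by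
  cases w with
  | nil => rfl
  | cons c t =>
    show (if c = '0' then false else _) = false
    split_ifs with h
    · rfl
    · simp only [decide_eq_false_iff_not]
      rintro ⟨h1, h2⟩
      omega

lemma pvOK_pos_iff (k : Int) (hk : 1 ≤ k) (c : Char) (t : List Char) (hc0 : c ≠ '0')
    (hdig : ∀ x ∈ c :: t, x.isDigit = true) :
    pvOK k (c :: t) = true ↔ natVal (c :: t) ≤ k.toNat := by
  have hof := ofChars?_digits (c :: t) (by simp) hdig
  show (if c = '0' then false else _) = true ↔ _
  rw [if_neg hc0, hof]
  simp only [Option.getD_some, decide_eq_true_eq]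
  have hge : 10 ^ t.length ≤ natVal (c :: t) := natVal_ge c t (hdig c List.mem_cons_self) hc0
  have h1 : (1 : Int) ≤ ((natVal (c :: t) : Nat) : Int) := by
    have : 1 ≤ 10 ^ t.length := Nat.one_le_pow _ _ (by omega)
    exact_mod_cast by omega
  constructor
  · rintro ⟨-, h2⟩; omega
  · intro h2; exact ⟨h1, by omega⟩

lemma pvOK_short (k : Int) (hk : 1 ≤ k) (c : Char) (t : List Char) (hc0 : c ≠ '0')
    (hdig : ∀ x ∈ c :: t, x.isDigit = true)
    (hlen : (c :: t).length < (PySem.Int.toChars k).length) :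
    pvOK k (c :: t) = true := by
  obtain ⟨kc, kt, hks, hkc0, hkdig, hkval⟩ := toChars_spec k hk
  rw [pvOK_pos_iff k hk c t hc0 hdig]
  have h1 : natVal (c :: t) < 10 ^ (c :: t).length := natVal_lt _ hdig
  have h2 : 10 ^ kt.length ≤ natVal (kc :: kt) := natVal_ge kc kt (hkdig kc List.mem_cons_self) hkc0
  have h3 : (c :: t).length ≤ kt.length := by
    rw [hks] at hlen
    simpa using Nat.lt_succ_iff.mp (by simpa using hlen)
  have h4 : (10 : Nat) ^ (c :: t).length ≤ 10 ^ kt.length := Nat.pow_le_pow_right (by omega) h3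
  omega

lemma pvOK_val (k : Int) (hk : 1 ≤ k) (c : Char) (t : List Char) (hc0 : c ≠ '0')
    (hdig : ∀ x ∈ c :: t, x.isDigit = true) :
    (pvOK k (c :: t) = true ↔ (PySem.Int.ofChars? (c :: t)).getD 0 ≤ k) := by
  rw [pvOK_pos_iff k hk c t hc0 hdig, ofChars?_digits (c :: t) (by simp) hdig]
  simp only [Option.getD_some]
  omega

-- ===== the sliding-window identity for pvF =====

-- window sum of suffix counts: f[i0] + ... + f[min(i0+d-1, n+1)-1]
def pvW (k : Int) (dT : Nat) (l : List Char) (i0 : Nat) : Int :=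
  ∑ j ∈ Finset.Ico i0 (min (i0 + dT - 1) (l.length + 1)), pvF k dT (l.drop j)

lemma pvKey (k : Int) (hk : 1 ≤ k) (l : List Char) (hdig : ∀ x ∈ l, x.isDigit = true)
    (i : Nat) (hi : i < l.length) (hne : l[i] ≠ '0') :
    pvF k ((PySem.Int.toChars k).length) (l.drop i) =
      (∑ j ∈ Finset.Ico (i + 1) (min (i + (PySem.Int.toChars k).length) (l.length + 1)),
        pvF k ((PySem.Int.toChars k).length) (l.drop j))
      + (if i + (PySem.Int.toChars k).length ≤ l.length ∧
            (PySem.Int.ofChars? ((l.drop i).take ((PySem.Int.toChars k).length))).getD 0 ≤ k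
          then pvF k ((PySem.Int.toChars k).length) (l.drop (i + (PySem.Int.toChars k).length)) else 0) := by
  obtain ⟨kc, kt, hks, -, -, -⟩ := toChars_spec k hk
  have hdT1 : 1 ≤ (PySem.Int.toChars k).length := by rw [hks]; simp
  obtain ⟨d', hd'⟩ : ∃ d', (PySem.Int.toChars k).length = d' + 1 :=
    ⟨(PySem.Int.toChars k).length - 1, by omega⟩
  rw [hd']
  have hcons : l.drop i = l[i] :: l.drop (i + 1) := List.drop_eq_getElem_cons hi
  have hdrop_len : (l.drop i).length = l.length - i := by simp
  have hdig' : ∀ (L : Nat), ∀ x ∈ (l.drop i).take L, x.isDigit = true :=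
    fun L x hx => hdig x (List.mem_of_mem_drop (List.mem_of_mem_take hx))
  -- each window of length 1 ≤ L with i+L ≤ n starts with l[i] ≠ '0' and is all digits
  have hwin : ∀ (L' : Nat), (l.drop i).take (L' + 1) = l[i] :: ((l.drop (i + 1)).take L') := by
    intro L'
    rw [hcons, List.take_succ_cons]
  have hterm : ∀ L, 1 ≤ L → L ≤ d' →
      (if L ≤ (l.drop i).length ∧ pvOK k ((l.drop i).take L) = true
        then pvF k (d' + 1) ((l.drop i).drop L) else 0)
      = (if L ≤ l.length - i then pvF k (d' + 1) (l.drop (i + L)) else 0) := by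
    intro L hL1 hLd
    obtain ⟨L', rfl⟩ : ∃ L', L = L' + 1 := ⟨L - 1, by omega⟩
    have hdd : (l.drop i).drop (L' + 1) = l.drop (i + (L' + 1)) := by
      rw [List.drop_drop]
    by_cases hcd : L' + 1 ≤ l.length - i
    · have hok : pvOK k ((l.drop i).take (L' + 1)) = true := by
        rw [hwin L']
        refine pvOK_short k hk _ _ hne (by rw [← hwin L']; exact hdig' (L' + 1)) ?_
        have : (((l.drop (i + 1)).take L').length) = L' := by
          rw [List.length_take]
          simp only [List.length_drop]
          omega
        simp only [List.length_cons, this]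
        omega
      rw [if_pos ⟨by omega, hok⟩, if_pos hcd, hdd]
    · rw [if_neg (by rw [hdrop_len]; rintro ⟨h1, -⟩; omega), if_neg hcd]
  rw [pvF_eq k (d' + 1) (l.drop i) (by omega)]
  rw [Finset.sum_Icc_succ_top (by omega : 1 ≤ d' + 1)]
  congr 1
  · -- the short windows: a plain running sum
    rw [Finset.sum_congr rfl (fun L hL => by
      simp only [Finset.mem_Icc] at hL
      exact hterm L hL.1 hL.2)]
    -- reindex j = i + L
    rw [← Finset.Ico_add_one_right_eq_Icc, Finset.sum_Ico_eq_sum_range, Finset.sum_Ico_eq_sum_range]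
    have hcard : min (i + (d' + 1)) (l.length + 1) - (i + 1) = min d' (l.length - i) := by omega
    rw [hcard]
    rw [show d' + 1 - 1 = d' from rfl]
    calc (∑ x ∈ Finset.range d', if 1 + x ≤ l.length - i then pvF k (d' + 1) (List.drop (i + (1 + x)) l) else 0)
        = ∑ x ∈ (Finset.range d').filter (fun x => 1 + x ≤ l.length - i),
            pvF k (d' + 1) (List.drop (i + (1 + x)) l) := (Finset.sum_filter _ _).symm
      _ = ∑ x ∈ Finset.range (min d' (l.length - i)), pvF k (d' + 1) (List.drop (i + (1 + x)) l) := by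
            refine Finset.sum_congr ?_ (fun _ _ => rfl)
            ext x
            simp only [Finset.mem_filter, Finset.mem_range, Finset.mem_range, lt_min_iff]
            omega
      _ = ∑ x ∈ Finset.range (min d' (l.length - i)), pvF k (d' + 1) (List.drop (i + 1 + x) l) := by
            refine Finset.sum_congr rfl (fun x _ => ?_)
            have hxx : i + (1 + x) = i + 1 + x := by omega
            rw [hxx]
  · -- the one window of full length d'+1: the string comparison
    rw [hdrop_len]
    by_cases hfit : i + (d' + 1) ≤ l.length
    · have hiff := pvOK_val k hk l[i] ((l.drop (i + 1)).take d') hne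
        (by rw [← hwin d']; exact hdig' (d' + 1))
      rw [hwin d']
      have hdd : (l.drop i).drop (d' + 1) = l.drop (i + (d' + 1)) := by
        rw [List.drop_drop]
      rw [hdd]
      by_cases hok : pvOK k (l[i] :: (l.drop (i + 1)).take d') = true
      · rw [if_pos ⟨by omega, hok⟩, if_pos ⟨hfit, hiff.mp hok⟩]
      · rw [if_neg (by rintro ⟨-, h2⟩; exact hok h2),
          if_neg (by rintro ⟨-, h2⟩; exact hok (hiff.mpr h2))]
    · rw [if_neg (by rintro ⟨h1, -⟩; omega), if_neg (by rintro ⟨h1, -⟩; omega)]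


-- ===== B's loop: the invariant (suffix table, window sum) and its preservation =====

lemma pvW_top (k : Int) (dT : Nat) (l : List Char) :
    pvW k dT l l.length = if 1 < dT then 1 else 0 := by
  unfold pvW
  by_cases h : 1 < dT
  · rw [if_pos h]
    have hset : Finset.Ico l.length (min (l.length + dT - 1) (l.length + 1)) = {l.length} := by
      ext x
      simp only [Finset.mem_Ico, Finset.mem_singleton, lt_min_iff]
      omega
    rw [hset, Finset.sum_singleton, List.drop_length]
    rw [pvF]
    simp
  · rw [if_neg h]
    rw [Finset.Ico_eq_empty (by omega), Finset.sum_empty]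

lemma pvBStep2 (k : Int) (hk : 1 ≤ k) (l : List Char) (hdig : ∀ x ∈ l, x.isDigit = true)
    (i : Nat) (hi : i < l.length) :
    pvBStepFun l k (((PySem.Int.toChars k).length : Nat) : Int)
        ((l.length : Nat) : Int)
        (pvFS k ((PySem.Int.toChars k).length) l (i + 1), pvW k ((PySem.Int.toChars k).length) l (i + 1))
        ((i : Nat) : Int)
      = (pvFS k ((PySem.Int.toChars k).length) l i, pvW k ((PySem.Int.toChars k).length) l i) := by
  obtain ⟨kc, kt, hks, -, -, -⟩ := toChars_spec k hk
  have hdT1 : 1 ≤ (PySem.Int.toChars k).length := by rw [hks]; simp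
  set dT := (PySem.Int.toChars k).length with hdTdef
  have hget : (PySem.List.pyGet? l ((i : Nat) : Int)).getD ' ' = l[i] := by
    rw [PySem.List.pyGet?_natCast, List.getElem?_eq_getElem hi, Option.getD_some]
  have hflen : (pvFS k dT l (i + 1)).length = l.length + 1 := pvFS_length k dT l (i + 1)
  -- the new f table equals pvFS l i in both branches
  have hf : (if ¬ ((PySem.List.pyGet? l ((i : Nat) : Int)).getD ' ' = '0') then
        let ways := pvW k dT l (i + 1)
        let ways := if ((i : Nat) : Int) + ((dT : Nat) : Int) ≤ ((l.length : Nat) : Int) ∧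
            (PySem.Int.ofChars? (PySem.List.slice l (some ((i : Nat) : Int)) (some (((i : Nat) : Int) + ((dT : Nat) : Int))))).getD 0 ≤ k then
            ways + PySem.List.pyGetD (pvFS k dT l (i + 1)) (((i : Nat) : Int) + ((dT : Nat) : Int)) 0 else ways
        PySem.List.pySetD (pvFS k dT l (i + 1)) ((i : Nat) : Int) ways
      else pvFS k dT l (i + 1)) = pvFS k dT l i := by
    rw [hget]
    by_cases hz : l[i] = '0'
    · rw [if_neg (by simp [hz])]
      exact pvFS_skip k dT l i hi hz
    · rw [if_pos (by simp [hz])]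
      simp only
      have hcast1 : ((i : Nat) : Int) + ((dT : Nat) : Int) = (((i + dT : Nat)) : Int) := by push_cast; ring
      have hslice : PySem.List.slice l (some ((i : Nat) : Int)) (some (((i : Nat) : Int) + ((dT : Nat) : Int)))
          = (l.drop i).take dT := by
        rw [hcast1, PySem.List.slice_natCast]
        congr 1
        omega
      have hcond : (((i : Nat) : Int) + ((dT : Nat) : Int) ≤ ((l.length : Nat) : Int) ∧
            (PySem.Int.ofChars? (PySem.List.slice l (some ((i : Nat) : Int)) (some (((i : Nat) : Int) + ((dT : Nat) : Int))))).getD 0 ≤ k)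
          ↔ (i + dT ≤ l.length ∧ (PySem.Int.ofChars? ((l.drop i).take dT)).getD 0 ≤ k) := by
        rw [hslice]
        constructor <;> rintro ⟨h1, h2⟩ <;> exact ⟨by exact_mod_cast h1, h2⟩
      have hways : (if ((i : Nat) : Int) + ((dT : Nat) : Int) ≤ ((l.length : Nat) : Int) ∧
            (PySem.Int.ofChars? (PySem.List.slice l (some ((i : Nat) : Int)) (some (((i : Nat) : Int) + ((dT : Nat) : Int))))).getD 0 ≤ k then
            pvW k dT l (i + 1) + PySem.List.pyGetD (pvFS k dT l (i + 1)) (((i : Nat) : Int) + ((dT : Nat) : Int)) 0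
          else pvW k dT l (i + 1)) = pvF k dT (l.drop i) := by
        rw [pvKey k hk l hdig i hi hz]
        have hWsum : pvW k dT l (i + 1)
            = ∑ j ∈ Finset.Ico (i + 1) (min (i + dT) (l.length + 1)), pvF k dT (l.drop j) := by
          unfold pvW
          congr 2
          omega
        by_cases hc : i + dT ≤ l.length ∧ (PySem.Int.ofChars? ((l.drop i).take dT)).getD 0 ≤ k
        · rw [if_pos (hcond.mpr hc), if_pos hc, hWsum]
          congr 1
          rw [hcast1, PySem.List.pyGetD_natCast,
            pvFS_getD k dT l (i + 1) (i + dT) (by omega), if_pos (by omega)]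
        · rw [if_neg (fun hx => hc (hcond.mp hx)), if_neg hc, add_zero, hWsum]
      rw [hways, PySem.List.pySetD_natCast, pvFS_set k dT l i hi]
  rw [show pvBStepFun l k (((dT : Nat)) : Int) ((l.length : Nat) : Int)
      (pvFS k dT l (i + 1), pvW k dT l (i + 1)) ((i : Nat) : Int)
    = ((if ¬ ((PySem.List.pyGet? l ((i : Nat) : Int)).getD ' ' = '0') then
          let ways := pvW k dT l (i + 1)
          let ways := if ((i : Nat) : Int) + ((dT : Nat) : Int) ≤ ((l.length : Nat) : Int) ∧
              (PySem.Int.ofChars? (PySem.List.slice l (some ((i : Nat) : Int)) (some (((i : Nat) : Int) + ((dT : Nat) : Int))))).getD 0 ≤ k then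
              ways + PySem.List.pyGetD (pvFS k dT l (i + 1)) (((i : Nat) : Int) + ((dT : Nat) : Int)) 0 else ways
          PySem.List.pySetD (pvFS k dT l (i + 1)) ((i : Nat) : Int) ways
        else pvFS k dT l (i + 1)),
       (let w1 := pvW k dT l (i + 1) + PySem.List.pyGetD (if ¬ ((PySem.List.pyGet? l ((i : Nat) : Int)).getD ' ' = '0') then
          let ways := pvW k dT l (i + 1)
          let ways := if ((i : Nat) : Int) + ((dT : Nat) : Int) ≤ ((l.length : Nat) : Int) ∧
              (PySem.Int.ofChars? (PySem.List.slice l (some ((i : Nat) : Int)) (some (((i : Nat) : Int) + ((dT : Nat) : Int))))).getD 0 ≤ k then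
              ways + PySem.List.pyGetD (pvFS k dT l (i + 1)) (((i : Nat) : Int) + ((dT : Nat) : Int)) 0 else ways
          PySem.List.pySetD (pvFS k dT l (i + 1)) ((i : Nat) : Int) ways
        else pvFS k dT l (i + 1)) ((i : Nat) : Int) 0
        if ((i : Nat) : Int) + ((dT : Nat) : Int) - 1 ≤ ((l.length : Nat) : Int) then
          w1 - PySem.List.pyGetD (if ¬ ((PySem.List.pyGet? l ((i : Nat) : Int)).getD ' ' = '0') then
          let ways := pvW k dT l (i + 1)
          let ways := if ((i : Nat) : Int) + ((dT : Nat) : Int) ≤ ((l.length : Nat) : Int) ∧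
              (PySem.Int.ofChars? (PySem.List.slice l (some ((i : Nat) : Int)) (some (((i : Nat) : Int) + ((dT : Nat) : Int))))).getD 0 ≤ k then
              ways + PySem.List.pyGetD (pvFS k dT l (i + 1)) (((i : Nat) : Int) + ((dT : Nat) : Int)) 0 else ways
          PySem.List.pySetD (pvFS k dT l (i + 1)) ((i : Nat) : Int) ways
        else pvFS k dT l (i + 1)) (((i : Nat) : Int) + ((dT : Nat) : Int) - 1) 0 else w1))
    from rfl]
  rw [hf]
  refine Prod.ext rfl ?_
  simp only
  -- now the window update
  have hgi : PySem.List.pyGetD (pvFS k dT l i) ((i : Nat) : Int) 0 = pvF k dT (l.drop i) := by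
    rw [PySem.List.pyGetD_natCast, pvFS_getD k dT l i i (by omega), if_pos le_rfl]
  rw [hgi]
  have hcast2 : ((i : Nat) : Int) + ((dT : Nat) : Int) - 1 = (((i + dT - 1 : Nat)) : Int) := by
    push_cast [Nat.cast_sub (by omega : 1 ≤ i + dT)]
    ring
  by_cases hj : i + dT - 1 ≤ l.length
  · rw [if_pos (by rw [hcast2]; exact_mod_cast hj), hcast2, PySem.List.pyGetD_natCast,
      pvFS_getD k dT l i (i + dT - 1) (by omega), if_pos (by omega)]
    unfold pvW
    have hmin1 : min (i + 1 + dT - 1) (l.length + 1) = i + dT := by omega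
    have hmin2 : min (i + dT - 1) (l.length + 1) = i + dT - 1 := by omega
    rw [hmin1, hmin2]
    obtain ⟨e, he⟩ : ∃ e, i + dT = e + 1 := ⟨i + dT - 1, by omega⟩
    rw [he]
    simp only [Nat.add_sub_cancel]
    have hA := Finset.sum_eq_sum_Ico_succ_bot (show i < e + 1 by omega) (fun j => pvF k dT (l.drop j))
    have hB := Finset.sum_Ico_succ_top (show i ≤ e by omega) (fun j => pvF k dT (l.drop j))
    simp only at hA hB
    linarith [hA, hB]
  · rw [if_neg (by rw [hcast2]; exact_mod_cast hj)]
    unfold pvW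
    have hmin1 : min (i + 1 + dT - 1) (l.length + 1) = l.length + 1 := by omega
    have hmin2 : min (i + dT - 1) (l.length + 1) = l.length + 1 := by omega
    rw [hmin1, hmin2]
    have hA := Finset.sum_eq_sum_Ico_succ_bot (show i < l.length + 1 by omega) (fun j => pvF k dT (l.drop j))
    simp only at hA
    linarith [hA]


lemma pvBFold2 (k : Int) (hk : 1 ≤ k) (l : List Char) (hdig : ∀ x ∈ l, x.isDigit = true) :
    ∀ i0, i0 ≤ l.length →
      (PySem.List.pyRange (((i0 : Nat) : Int) - 1) (-1) (-1)).foldl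
        (pvBStepFun l k (((PySem.Int.toChars k).length : Nat) : Int)
          ((l.length : Nat) : Int))
        (pvFS k ((PySem.Int.toChars k).length) l i0, pvW k ((PySem.Int.toChars k).length) l i0)
      = (pvFS k ((PySem.Int.toChars k).length) l 0, pvW k ((PySem.Int.toChars k).length) l 0) := by
  intro i0
  induction i0 with
  | zero =>
    intro _
    rw [show (((0 : Nat) : Int) - 1) = (-1 : Int) by norm_num,
      PySem.List.pyRange_neg_one_eq_nil le_rfl]
    rfl
  | succ m ihm =>
    intro hm
    have hcast : (((m + 1 : Nat) : Int) - 1) = ((m : Nat) : Int) := by push_cast; ring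
    rw [hcast, PySem.List.pyRange_neg_one_cons (by omega), List.foldl_cons,
      pvBStep2 k hk l hdig m (by omega), ihm (by omega)]

lemma pvDigitBridge (c : Char) : PySem.Chars.isdigit c = Char.isDigit c := by
  simp only [PySem.Chars.isdigit, Char.isDigit]
  rfl

lemma pvF_k0 (k : Int) (hk : k < 1) (d : Nat) (l : List Char) (hne : l ≠ []) :
    pvF k d l = 0 := by
  rw [pvF_eq k d l (by simpa using hne)]
  refine Finset.sum_eq_zero (fun L hL => ?_)
  rw [if_neg]
  rintro ⟨-, h⟩
  rw [pvOK_k0 k hk] at h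
  exact absurd h (by simp)

-- A's port equals pvG modulo 10^9+7 (for nonempty s)
lemma pvAVal (s : String) (k : Int) (hne : s.toList ≠ []) :
    numberOfArrays s k = PySem.Int.mod (pvG k ((PySem.Int.toChars k).length) s.toList) (10 ^ 9 + 7) := by
  unfold numberOfArrays
  simp only [PySem.List.len_eq]
  have hnpos : 1 ≤ s.toList.length := by
    cases h : s.toList with
    | nil => exact absurd h hne
    | cons a l' => simp
  have htn : ((s.toList.length : Int)).toNat = s.toList.length := by omega
  rw [htn, pvAFold k ((PySem.Int.toChars k).length) s.toList s.toList.length le_rfl]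
  have hc1 : ((s.toList.length : Int) - 1) = ((s.toList.length - 1 : Nat) : Int) := by omega
  rw [hc1, PySem.List.pyGet?_natCast, ← List.getD_eq_getElem?_getD,
    pvDP_getD k ((PySem.Int.toChars k).length) s.toList s.toList.length (s.toList.length - 1)
      (by omega), if_pos (by omega)]
  have hc2 : s.toList.length - 1 + 1 = s.toList.length := by omega
  rw [hc2, List.take_length]

-- B's port equals pvF modulo 10^9+7 (for nonempty all-digit s, k ≥ 1)
lemma pvBVal (s : String) (k : Int) (hk : 1 ≤ k) (hne : s.toList ≠ [])
    (hdig : ∀ x ∈ s.toList, x.isDigit = true) :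
    numberOfArrays_alt s k = PySem.Int.mod (pvF k ((PySem.Int.toChars k).length) s.toList) (10 ^ 9 + 7) := by
  unfold numberOfArrays_alt
  rw [if_neg (by omega)]
  simp only [PySem.List.len_eq]
  set l := s.toList with hl
  set dT := (PySem.Int.toChars k).length with hdT
  have hnpos : 1 ≤ l.length := by
    cases h : l with
    | nil => exact absurd h hne
    | cons a l' => simp
  have htn : ((l.length : Int)).toNat = l.length := by omega
  have hf0 : PySem.List.pySetD (List.replicate (((l.length : Int)).toNat + 1) 0) ((l.length : Int)) 1
      = pvFS k dT l l.length := by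
    rw [htn, PySem.List.pySetD_natCast, pvFS_base k dT l]
  have hw0 : (if 1 < ((dT : Nat) : Int) then
        PySem.List.pyGetD (pvFS k dT l l.length) ((l.length : Int)) 0 else 0)
      = pvW k dT l l.length := by
    rw [pvW_top k dT l]
    by_cases h : 1 < dT
    · rw [if_pos (by exact_mod_cast h), if_pos h, PySem.List.pyGetD_natCast,
        pvFS_getD k dT l l.length l.length (by omega), if_pos le_rfl, List.drop_length]
      rw [pvF]
      simp
    · rw [if_neg (by exact_mod_cast h), if_neg h]
  rw [hf0, hw0]
  have hfold := pvBFold2 k hk l hdig l.length le_rfl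
  rw [hfold]
  rw [PySem.List.pyGet?_zero, ← List.getD_eq_getElem?_getD,
    pvFS_getD k dT l 0 0 (by omega), if_pos le_rfl, List.drop_zero]

lemma pvPortEq (s : String) (k : Int) (hne : s.toList ≠ [])
    (hdig : ∀ x ∈ s.toList, x.isDigit = true) :
    numberOfArrays s k = numberOfArrays_alt s k := by
  by_cases hk : k < 1
  · rw [pvAVal s k hne, ← pvFG, pvF_k0 k hk _ s.toList hne]
    unfold numberOfArrays_alt
    rw [if_pos hk]
    decide
  · rw [pvAVal s k hne, pvBVal s k (by omega) hne hdig, pvFG]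

-- ===== VERDICT (by name: the statement is the Claim_ definition above) =====
theorem numberOfArrays_spec : Claim_equal_numberOfArrays := by
  intro s k _ hpre
  unfold Spec_numberOfArrays
  unfold Pre_numberOfArrays at hpre
  simp only [PySem.Str.strIsdigit, PySem.Chars.strIsdigit, Bool.and_eq_true,
    Bool.not_eq_eq_eq_not, List.all_eq_true] at hpre
  obtain ⟨hne, hall⟩ := hpre
  refine pvPortEq s k ?_ ?_
  · intro h
    rw [h] at hne
    simp at hne
  · intro x hx
    rw [← pvDigitBridge]
    exact hall x hx
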